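-- pv_equiv track=rewrite | github.com/awillard1/password-mangler | mangler_rule_optimizer.py | apply_simple_rule
-- ===== SOURCE A (Python) =====
-- def apply_simple_rule(word: str, rule: str) -> str:
--     """
--     Apply a simple Hashcat rule to a word (subset of Hashcat rule syntax).
--
--     Supports common rule functions:
--     - : (do nothing)
--     - l (lowercase all)
--     - u (uppercase all)
--     - c (capitalize)
--     - C (lowercase first, uppercase rest)
--     - t (toggle case)
--     - r (reverse)
--     - d (duplicate)
--     - $ (append)
--     - ^ (prepend)
--     - s (substitute)
--     - @ (purge character)
--     - z (duplicate first char)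
--     - Z (duplicate last char)
--     """
--     result = word
--
--     i = 0
--     while i < len(rule):
--         op = rule[i]
--
--         if op == ':':
--             # No-op
--             pass
--
--         elif op == 'l':
--             # Lowercase all
--             result = result.lower()
--
--         elif op == 'u':
--             # Uppercase all
--             result = result.upper()
--
--         elif op == 'c':
--             # Capitalize first letter
--             if result:
--                 result = result[0].upper() + result[1:].lower()
--
--         elif op == 'C':
--             # Lowercase first, uppercase rest
--             if result:
--                 result = result[0].lower() + result[1:].upper()
--
--         elif op == 't':
--             # Toggle case
--             result = result.swapcase()
--
--         elif op == 'r':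
--             # Reverse
--             result = result[::-1]
--
--         elif op == 'd':
--             # Duplicate
--             result = result + result
--
--         elif op == '$' and i + 1 < len(rule):
--             # Append character
--             result += rule[i + 1]
--             i += 1
--
--         elif op == '^' and i + 1 < len(rule):
--             # Prepend character
--             result = rule[i + 1] + result
--             i += 1
--
--         elif op == 's' and i + 2 < len(rule):
--             # Substitute character
--             old_char = rule[i + 1]
--             new_char = rule[i + 2]
--             result = result.replace(old_char, new_char)
--             i += 2
--
--         elif op == '@' and i + 1 < len(rule):
--             # Purge/remove character
--             char_to_remove = rule[i + 1]
--             result = result.replace(char_to_remove, '')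
--             i += 1
--
--         elif op == 'z':
--             # Duplicate first character
--             if result:
--                 result = result[0] + result
--
--         elif op == 'Z':
--             # Duplicate last character
--             if result:
--                 result = result + result[-1]
--
--         i += 1
--
--     return result
-- ===== SOURCE B (Python) =====
-- def _tokenize(rule):
--     """Parse the rule string into a list of complete operation tokens.
--     Operators whose argument characters run past the end of the rule, ':'
--     and unrecognized characters produce no token (no-ops)."""
--     toks = []
--     i = 0
--     n = len(rule)
--     while i < n:
--         op = rule[i]
--         if op in 'lucCtrdzZ':
--             toks.append((op, ''))
--             i += 1
--         elif op in '$^@' and i + 1 < n: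
--             toks.append((op, rule[i + 1]))
--             i += 2
--         elif op == 's' and i + 2 < n:
--             toks.append(('s', rule[i + 1] + rule[i + 2]))
--             i += 3
--         else:
--             i += 1
--     return toks
--
--
-- def _apply_token(result, tok):
--     op, arg = tok
--     if op == 'l':
--         return result.lower()
--     if op == 'u':
--         return result.upper()
--     if op == 'c':
--         return result[0].upper() + result[1:].lower() if result else result
--     if op == 'C':
--         return result[0].lower() + result[1:].upper() if result else result
--     if op == 't':
--         return result.swapcase()
--     if op == 'r':
--         return result[::-1]
--     if op == 'd':
--         return result + result
--     if op == '$':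
--         return result + arg
--     if op == '^':
--         return arg + result
--     if op == 's':
--         return result.replace(arg[0], arg[1])
--     if op == '@':
--         return result.replace(arg, '')
--     if op == 'z':
--         return result[0] + result if result else result
--     if op == 'Z':
--         return result + result[-1] if result else result
--     return result
--
--
-- def apply_simple_rule(word: str, rule: str) -> str:
--     result = word
--     for tok in _tokenize(rule):
--         result = _apply_token(result, tok)
--     return result
-- ===== Notes on version B (the rewrite author's own statement) =====
-- stated objective: alternative
-- what changed: A's single interleaved while-loop with manual index bumping is split into two passes: a tokenizer that groups each operator with exactly the argument characters it consumes (dropping incomplete or unknown operators as no-ops), followed by a fold that applies each complete token to the word.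
import Mathlib
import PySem

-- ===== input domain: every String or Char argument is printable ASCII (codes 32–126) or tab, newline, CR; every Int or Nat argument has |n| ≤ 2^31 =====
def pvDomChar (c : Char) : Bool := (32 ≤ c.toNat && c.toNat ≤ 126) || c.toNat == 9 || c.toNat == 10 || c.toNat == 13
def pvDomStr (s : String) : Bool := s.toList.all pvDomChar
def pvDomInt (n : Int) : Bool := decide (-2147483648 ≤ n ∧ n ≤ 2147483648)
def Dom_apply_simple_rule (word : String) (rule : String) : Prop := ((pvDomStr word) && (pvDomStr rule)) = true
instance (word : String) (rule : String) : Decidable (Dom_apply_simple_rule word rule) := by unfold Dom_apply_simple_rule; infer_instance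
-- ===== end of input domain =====

-- B re-decomposes A's single interleaved while-loop into two passes — tokenize the rule
-- into complete (operator, argument) tokens, then fold the token list over the word —
-- same cost, different structure (objective: alternative).

-- ===== PORT A =====
-- str.swapcase, ported per character (exact on ASCII: A-Z ↔ a-z, everything else unchanged)
def pvSwapcase (cs : List Char) : List Char :=
  cs.map (fun c =>
    if PySem.Chars.isupper c then PySem.Chars.lowerChar c
    else if PySem.Chars.islower c then PySem.Chars.upperChar c
    else c)

-- the while-loop of A: `result` is the accumulator, the second list is the unread
-- suffix of `rule`; each guarded elif of A is a branch (a failed `$`/`^`/`@`/`s`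
-- argument guard falls through to the remaining elifs, none of which match, so it
-- is a no-op and only `i += 1` happens — transcribed branch for branch)
def pvLoopA (result : List Char) : List Char → List Char
  | [] => result
  | op :: rest =>
    if op = ':' then pvLoopA result rest
    else if op = 'l' then pvLoopA (PySem.Chars.lower result) rest
    else if op = 'u' then pvLoopA (PySem.Chars.upper result) rest
    else if op = 'c' then
      pvLoopA (match result with
        | [] => result
        | c :: r => PySem.Chars.upper [c] ++ PySem.Chars.lower r) rest
    else if op = 'C' then
      pvLoopA (match result with
        | [] => result
        | c :: r => PySem.Chars.lower [c] ++ PySem.Chars.upper r) rest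
    else if op = 't' then pvLoopA (pvSwapcase result) rest
    else if op = 'r' then pvLoopA result.reverse rest  -- result[::-1]
    else if op = 'd' then pvLoopA (result ++ result) rest
    else if op = '$' then
      match rest with
      | c :: rest' => pvLoopA (result ++ [c]) rest'
      | [] => result
    else if op = '^' then
      match rest with
      | c :: rest' => pvLoopA (c :: result) rest'
      | [] => result
    else if op = 's' then
      match rest with
      | c1 :: c2 :: rest' => pvLoopA (PySem.Chars.replace result [c1] [c2]) rest'
      | [c] => pvLoopA result [c]
      | [] => result
    else if op = '@' then
      match rest with
      | c :: rest' => pvLoopA (PySem.Chars.replace result [c] []) rest'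
      | [] => result
    else if op = 'z' then
      pvLoopA (match result with
        | [] => result
        | c :: r => c :: c :: r) rest
    else if op = 'Z' then
      pvLoopA (if h : result ≠ [] then result ++ [result.getLast h] else result) rest
    else pvLoopA result rest

def apply_simple_rule (word : String) (rule : String) : String :=
  String.ofList (pvLoopA word.toList rule.toList)

-- ===== PORT B =====
-- pass 1 of Source B (_tokenize): parse the rule into complete (operator, argument) tokens;
-- ':' , unknown operators and operators with missing arguments yield no token
def pvTokenize : List Char → List (Char × List Char)
  | [] => []
  | op :: rest =>
    if op ∈ (['l', 'u', 'c', 'C', 't', 'r', 'd', 'z', 'Z'] : List Char) then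
      (op, ([] : List Char)) :: pvTokenize rest
    else if op ∈ (['$', '^', '@'] : List Char) then
      match rest with
      | c :: rest' => (op, [c]) :: pvTokenize rest'
      | [] => []
    else if op = 's' then
      match rest with
      | c1 :: c2 :: rest' => (op, [c1, c2]) :: pvTokenize rest'
      | [c] => pvTokenize [c]
      | [] => []
    else pvTokenize rest

-- pass 2 of Source B (_apply_token): apply one token to the accumulated result
def pvApplyTok (result : List Char) (tok : Char × List Char) : List Char :=
  if tok.1 = 'l' then PySem.Chars.lower result
  else if tok.1 = 'u' then PySem.Chars.upper result
  else if tok.1 = 'c' then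
    match result with
    | [] => result
    | c :: r => PySem.Chars.upper [c] ++ PySem.Chars.lower r
  else if tok.1 = 'C' then
    match result with
    | [] => result
    | c :: r => PySem.Chars.lower [c] ++ PySem.Chars.upper r
  else if tok.1 = 't' then pvSwapcase result
  else if tok.1 = 'r' then result.reverse
  else if tok.1 = 'd' then result ++ result
  else if tok.1 = '$' then result ++ tok.2
  else if tok.1 = '^' then tok.2 ++ result
  else if tok.1 = 's' then
    match tok.2 with  -- arg[0], arg[1]
    | a :: b :: _ => PySem.Chars.replace result [a] [b]
    | _ => result
  else if tok.1 = '@' then PySem.Chars.replace result tok.2 []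
  else if tok.1 = 'z' then
    match result with
    | [] => result
    | c :: r => c :: c :: r
  else if tok.1 = 'Z' then
    if h : result ≠ [] then result ++ [result.getLast h] else result
  else result

def apply_simple_rule_alt (word : String) (rule : String) : String :=
  String.ofList ((pvTokenize rule.toList).foldl pvApplyTok word.toList)

-- ===== PRECONDITION & SPEC =====
def Spec_apply_simple_rule (word : String) (rule : String) (out : String) : Prop := out = apply_simple_rule_alt word rule
instance (word : String) (rule : String) (out : String) : Decidable (Spec_apply_simple_rule word rule out) := by unfold Spec_apply_simple_rule; infer_instance

-- ===== CLAIM (what is proved, stated in full; the proofs are below) =====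
def Claim_equal_apply_simple_rule : Prop := ∀ (word : String) (rule : String), Dom_apply_simple_rule word rule → Spec_apply_simple_rule word rule (apply_simple_rule word rule)

-- ===== LEMMAS AND PROOFS =====
-- one-step unfolding of pvTokenize on a cons cell (its auto-generated equations are
-- split by the shape of `rest`, which the main induction does not always know)
theorem pvTokenize_cons (op : Char) (rest : List Char) :
    pvTokenize (op :: rest) =
      if op ∈ (['l', 'u', 'c', 'C', 't', 'r', 'd', 'z', 'Z'] : List Char) then
        (op, ([] : List Char)) :: pvTokenize rest
      else if op ∈ (['$', '^', '@'] : List Char) then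
        match rest with
        | c :: rest' => (op, [c]) :: pvTokenize rest'
        | [] => []
      else if op = 's' then
        match rest with
        | c1 :: c2 :: rest' => (op, [c1, c2]) :: pvTokenize rest'
        | [c] => pvTokenize [c]
        | [] => []
      else pvTokenize rest := by
  conv_lhs => rw [pvTokenize.eq_def]

theorem pvLoopA_eq_foldl (result rest : List Char) :
    pvLoopA result rest = (pvTokenize rest).foldl pvApplyTok result := by
  fun_induction pvLoopA result rest <;>
    first
    | rfl
    | simp_all [pvTokenize, pvTokenize_cons, pvApplyTok]

-- ===== VERDICT (by name: the statement is the Claim_ definition above) =====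
theorem apply_simple_rule_spec : Claim_equal_apply_simple_rule := by
  intro word rule _
  unfold Spec_apply_simple_rule apply_simple_rule apply_simple_rule_alt
  rw [pvLoopA_eq_foldl]
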